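-- pv_equiv track=rewrite | github.com/kevinshuan/enzyme-platform | dashboard/app.py | _sequence_diff_html
-- ===== SOURCE A (Python) =====
-- def _sequence_diff_html(base: str, mutated: str, mutation_positions: list[int]) -> str:
--     """Render mutated sequence as HTML with mutation positions highlighted."""
--     mut_set = set(mutation_positions)
--     parts: list[str] = []
--     for i, aa in enumerate(mutated):
--         if i in mut_set:
--             orig = base[i] if i < len(base) else "?"
--             parts.append(
--                 f'<span title="{orig}{i+1}{aa}" style="'
--                 f'background:#e74c3c;color:#fff;'
--                 f'border-radius:3px;padding:1px 3px;'
--                 f'font-family:monospace;font-size:13px">{aa}</span>'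
--             )
--         else:
--             parts.append(
--                 f'<span style="font-family:monospace;font-size:13px">{aa}</span>'
--             )
--     # Wrap in 60-char rows for readability
--     chars_per_row = 60
--     rows: list[str] = []
--     flat = "".join(parts)
--     # Re-chunk by original characters (not HTML tags)
--     raw_parts = []
--     i = 0
--     for aa in mutated:
--         if i in set(mutation_positions):
--             orig = base[i] if i < len(base) else "?"
--             raw_parts.append(
--                 f'<span title="{orig}{i+1}{aa}" style="'
--                 f'background:#e74c3c;color:#fff;'
--                 f'border-radius:3px;padding:1px 3px;'
--                 f'font-family:monospace;font-size:13px">{aa}</span>'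
--             )
--         else:
--             raw_parts.append(
--                 f'<span style="font-family:monospace;font-size:13px">{aa}</span>'
--             )
--         i += 1
--
--     for start in range(0, len(raw_parts), chars_per_row):
--         pos_label = f'<span style="color:#888;font-size:11px;font-family:monospace">{start+1:4d} </span>'
--         row_html = "".join(raw_parts[start : start + chars_per_row])
--         rows.append(pos_label + row_html)
--
--     return "<br>".join(rows)
-- ===== SOURCE B (Python) =====
-- def _sequence_diff_html(base: str, mutated: str, mutation_positions: list[int]) -> str:
--     """Render mutated sequence as highlighted HTML in ONE flat pass: row labels and
--     row breaks are emitted at 60-character boundaries instead of building a span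
--     list and re-chunking it by slicing."""
--     mut_set = set(mutation_positions)
--     html: list[str] = []
--     for i, aa in enumerate(mutated):
--         if i % 60 == 0:
--             if i != 0:
--                 html.append("<br>")
--             html.append(
--                 f'<span style="color:#888;font-size:11px;font-family:monospace">{i+1:4d} </span>'
--             )
--         if i in mut_set:
--             orig = base[i] if i < len(base) else "?"
--             html.append("".join([
--                 '<span title="', orig, str(i + 1), aa,
--                 '" style="background:#e74c3c;color:#fff;',
--                 'border-radius:3px;padding:1px 3px;',
--                 'font-family:monospace;font-size:13px">', aa, '</span>',
--             ]))
--         else: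
--             html.append("".join([
--                 '<span style="font-family:monospace;font-size:13px">', aa, '</span>',
--             ]))
--     return "".join(html)
-- ===== Notes on version B (the rewrite author's own statement) =====
-- stated objective: faster
-- what changed: B replaces A's two span-building passes plus slice-based re-chunking (with set(mutation_positions) rebuilt for every character) by one flat pass over the sequence that emits the row label and '<br>' whenever the index hits a 60-character boundary, joining everything once at the end.
import Mathlib
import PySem

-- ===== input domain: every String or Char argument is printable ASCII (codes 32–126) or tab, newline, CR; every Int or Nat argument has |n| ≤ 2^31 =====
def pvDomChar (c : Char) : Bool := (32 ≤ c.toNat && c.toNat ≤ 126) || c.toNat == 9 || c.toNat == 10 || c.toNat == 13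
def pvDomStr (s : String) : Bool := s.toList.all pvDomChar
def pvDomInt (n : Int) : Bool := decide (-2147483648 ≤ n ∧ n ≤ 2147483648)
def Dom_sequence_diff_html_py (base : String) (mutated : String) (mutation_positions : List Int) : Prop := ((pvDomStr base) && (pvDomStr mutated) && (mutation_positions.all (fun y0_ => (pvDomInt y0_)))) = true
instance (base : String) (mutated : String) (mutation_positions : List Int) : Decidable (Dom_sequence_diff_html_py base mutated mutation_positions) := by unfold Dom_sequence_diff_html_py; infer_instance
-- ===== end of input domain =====

-- B replaces A's two span-building passes plus slice-based re-chunking by a single flat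
-- pass that emits the row label and '<br>' at each 60-character boundary; same output.

-- ===== PORT A =====
-- f'{m:4d} ' label padding of A (m ≥ 1 in both programs)
def pvFmt4 (m : Int) : String :=
  String.ofList (List.replicate (4 - (PySem.Int.toChars m).length) ' ' ++ PySem.Int.toChars m)

-- A's f-string position label '<span …>{start+1:4d} </span>'
def pvPosLabel (startPos : Int) : String :=
  "<span style=\"color:#888;font-size:11px;font-family:monospace\">" ++ pvFmt4 startPos ++ " </span>"

-- the span emitted for character aa at index i (the two identical f-strings of A's loops)
def seqA_span (base : String) (mutSet : PySem.Set Int) (i : Int) (aa : Char) : String :=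
  if PySem.Set.contains mutSet i then
    let orig : String :=
      if i < PySem.Str.len base then String.ofList [(PySem.Str.pyGet? base i).getD '?'] else "?"
    "<span title=\"" ++ orig ++ PySem.Int.toStr (i + 1) ++ String.ofList [aa] ++
      "\" style=\"background:#e74c3c;color:#fff;border-radius:3px;padding:1px 3px;font-family:monospace;font-size:13px\">" ++
      String.ofList [aa] ++ "</span>"
  else
    "<span style=\"font-family:monospace;font-size:13px\">" ++ String.ofList [aa] ++ "</span>"

def sequence_diff_html_py (base : String) (mutated : String) (mutation_positions : List Int) : String :=
  let mutSet := PySem.Set.ofList mutation_positions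
  let mL := mutated.toList
  -- first pass (parts / flat): computed and never used, as in A
  let parts := (PySem.List.enumerate mL).map (fun p => seqA_span base mutSet p.1 p.2)
  let _flat := PySem.Str.join "" parts
  -- second pass: re-chunk by original characters (A recomputes set(mutation_positions) each step)
  let raw_parts := (PySem.List.enumerate mL).map
    (fun p => seqA_span base (PySem.Set.ofList mutation_positions) p.1 p.2)
  let rows := (PySem.List.pyRange 0 raw_parts.length 60).map (fun start =>
    pvPosLabel (start + 1) ++
      PySem.Str.join "" (PySem.List.slice raw_parts (some start) (some (start + 60))))
  PySem.Str.join "<br>" rows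

-- ===== PORT B =====
-- B's f'{i+1:4d} ' padding, written over str(i+1)
def seqB_pad4 (m : Nat) : String :=
  let ds := PySem.Int.toStr (m : Int)
  String.ofList (List.replicate (4 - ds.toList.length) ' ') ++ ds

def seqB_label (m : Nat) : String :=
  "<span style=\"color:#888;font-size:11px;font-family:monospace\">" ++ seqB_pad4 m ++ " </span>"

-- B's span: ''.join of the f-string pieces
def seqB_span (base : String) (mutSet : PySem.Set Int) (i : Int) (aa : Char) : String :=
  if PySem.Set.contains mutSet i then
    PySem.Str.join "" ["<span title=\"",
      (if i < PySem.Str.len base then String.ofList [(PySem.Str.pyGet? base i).getD '?'] else "?"),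
      PySem.Int.toStr (i + 1), String.ofList [aa],
      "\" style=\"background:#e74c3c;color:#fff;",
      "border-radius:3px;padding:1px 3px;",
      "font-family:monospace;font-size:13px\">",
      String.ofList [aa], "</span>"]
  else
    PySem.Str.join "" ["<span style=\"font-family:monospace;font-size:13px\">",
      String.ofList [aa], "</span>"]

-- B's single flat pass: at each 60-boundary emit '<br>' (except at 0) and the label
def seqB_go (base : String) (mutSet : PySem.Set Int) : List Char → Nat → List String
  | [], _ => []
  | aa :: rest, i =>
      (if i % 60 = 0 then
        (if i ≠ 0 then ["<br>"] else []) ++ [seqB_label (i + 1)]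
      else []) ++
      (seqB_span base mutSet (i : Int) aa :: seqB_go base mutSet rest (i + 1))

def sequence_diff_html_py_alt (base : String) (mutated : String) (mutation_positions : List Int) : String :=
  let mutSet := PySem.Set.ofList mutation_positions
  PySem.Str.join "" (seqB_go base mutSet mutated.toList 0)

-- ===== PRECONDITION & SPEC =====
def Spec_sequence_diff_html_py (base : String) (mutated : String) (mutation_positions : List Int) (out : String) : Prop := out = sequence_diff_html_py_alt base mutated mutation_positions
instance (base : String) (mutated : String) (mutation_positions : List Int) (out : String) : Decidable (Spec_sequence_diff_html_py base mutated mutation_positions out) := by unfold Spec_sequence_diff_html_py; infer_instance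

-- ===== CLAIM (what is proved, stated in full; the proofs are below) =====
def Claim_equal_sequence_diff_html_py : Prop := ∀ (base : String) (mutated : String) (mutation_positions : List Int), Dom_sequence_diff_html_py base mutated mutation_positions → Spec_sequence_diff_html_py base mutated mutation_positions (sequence_diff_html_py base mutated mutation_positions)

-- ===== LEMMAS AND PROOFS =====

theorem sj_single (s x : String) : PySem.Str.join s [x] = x := by
  simp [PySem.Str.join, PySem.Chars.join, List.intercalate, String.ofList_toList]

theorem flat_inter (l : List (List Char)) :
    (List.intersperse ([] : List Char) l).flatten = l.flatten := by
  induction l with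
  | nil => rfl
  | cons a t ih => cases t <;> simp_all [List.intersperse]

-- the two span builders produce the same string
theorem span_eq (base : String) (mutSet : PySem.Set Int) (i : Int) (aa : Char) :
    seqB_span base mutSet i aa = seqA_span base mutSet i aa := by
  unfold seqB_span seqA_span
  apply String.toList_inj.mp
  split <;>
    simp [PySem.Str.join, PySem.Chars.join, List.intercalate,
      String.toList_append, String.toList_ofList]

-- the two label builders produce the same string (at the shared argument shape m+1)
theorem label_eq (m : Nat) : seqB_label (m + 1) = pvPosLabel ((m : Int) + 1) := by
  unfold seqB_label pvPosLabel seqB_pad4 pvFmt4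
  have h : ((m : Int) + 1) = (((m + 1 : Nat) : Int)) := by push_cast; ring
  apply String.toList_inj.mp
  rw [h]
  simp [PySem.Int.toList_toStr, String.toList_append, String.toList_ofList]

-- PySem.Str.join facts used to flatten/split the joins
theorem sj_nil (s : String) : PySem.Str.join s [] = "" := by
  simp [PySem.Str.join, PySem.Chars.join, List.intercalate]

theorem sj_empty_cons (x : String) (xs : List String) :
    PySem.Str.join "" (x :: xs) = x ++ PySem.Str.join "" xs := by
  simp [PySem.Str.join, PySem.Chars.join, List.intercalate, flat_inter, String.ofList_append,
    String.ofList_toList]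

theorem sj_empty_append (xs ys : List String) :
    PySem.Str.join "" (xs ++ ys) = PySem.Str.join "" xs ++ PySem.Str.join "" ys := by
  induction xs with
  | nil => simp [sj_nil]
  | cons x t ih => simp [sj_empty_cons, ih, String.append_assoc]

theorem sj_cons (s x : String) (xs : List String) (h : xs ≠ []) :
    PySem.Str.join s (x :: xs) = x ++ s ++ PySem.Str.join s xs := by
  cases xs with
  | nil => simp at h
  | cons y t =>
    simp [PySem.Str.join, PySem.Chars.join, List.intercalate, String.ofList_append,
      String.ofList_toList, String.append_assoc]

-- zipIdx slides under take/drop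
theorem zipIdx_take {α : Type} (l : List α) (s m : Nat) :
    (l.zipIdx s).take m = (l.take m).zipIdx s := by
  induction l generalizing s m with
  | nil => simp
  | cons a t ih => cases m <;> simp [List.zipIdx_cons, ih]

theorem zipIdx_drop {α : Type} (l : List α) (s m : Nat) :
    (l.zipIdx s).drop m = (l.drop m).zipIdx (s + m) := by
  induction l generalizing s m with
  | nil => simp
  | cons a t ih =>
    cases m with
    | zero => simp
    | succ m => simp [List.zipIdx_cons, ih, Nat.add_assoc, Nat.add_comm 1 m]

-- enumerate as zipIdx, so both sides index the same way
theorem map_enumerate_zipIdx {α β : Type} (F : Int × α → β) :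
    ∀ (xs : List α) (s : Nat),
      (PySem.List.enumerate xs (s : Int)).map F = (xs.zipIdx s).map (fun p => F ((p.2 : Int), p.1)) := by
  intro xs
  induction xs with
  | nil => intro s; simp [PySem.List.enumerate_nil]
  | cons x xs ih =>
    intro s
    have h := ih (s + 1)
    simp [PySem.List.enumerate_cons, List.zipIdx_cons] at h ⊢
    exact h

-- the spans of cs starting at absolute index off
def rawOf (base : String) (mutSet : PySem.Set Int) (cs : List Char) (off : Nat) : List String :=
  (cs.zipIdx off).map (fun p => seqB_span base mutSet (p.2 : Int) p.1)

-- reference chunking: the rows both programs produce, by recursion on 60-char chunks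
def rowsC (base : String) (mutSet : PySem.Set Int) : List Char → Nat → List String
  | [], _ => []
  | aa :: rest, k =>
      (seqB_label (k + 1) ++
        PySem.Str.join "" (rawOf base mutSet ((aa :: rest).take 60) k))
        :: rowsC base mutSet (rest.drop 59) (k + 60)
  termination_by cs _ => cs.length
  decreasing_by simp only [List.length_drop, List.length_cons]; omega

theorem rawOf_length (base : String) (mutSet : PySem.Set Int) (cs : List Char) (off : Nat) :
    (rawOf base mutSet cs off).length = cs.length := by
  simp [rawOf]

theorem rawOf_drop (base : String) (mutSet : PySem.Set Int) (cs : List Char) (off m : Nat) :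
    (rawOf base mutSet cs off).drop m = rawOf base mutSet (cs.drop m) (off + m) := by
  simp [rawOf, ← zipIdx_drop, List.map_drop]

theorem rawOf_take (base : String) (mutSet : PySem.Set Int) (cs : List Char) (off m : Nat) :
    (rawOf base mutSet cs off).take m = rawOf base mutSet (cs.take m) off := by
  simp [rawOf, ← zipIdx_take, List.map_take]

-- A's chunk map (already normalised to Nat range/drop/take) is rowsC
theorem lemA (base : String) (mutSet : PySem.Set Int) :
    ∀ n (cs : List Char), cs.length ≤ n → ∀ (off : Nat),
      (List.range ((cs.length + 59) / 60)).map (fun j =>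
        seqB_label (60 * j + off + 1) ++
          PySem.Str.join "" (((rawOf base mutSet cs off).drop (60 * j)).take 60))
      = rowsC base mutSet cs off := by
  intro n
  induction n with
  | zero =>
    intro cs h off
    have hnil : cs = [] := List.eq_nil_of_length_eq_zero (Nat.le_zero.mp h)
    subst hnil
    simp only [rowsC]
    simp
  | succ n ih =>
    intro cs h off
    cases cs with
    | nil => simp only [rowsC]; simp
    | cons aa rest =>
      simp only [rowsC]
      have hm : ((aa :: rest).length + 59) / 60 = (((rest.drop 59).length + 59) / 60) + 1 := by
        simp only [List.length_cons, List.length_drop]; omega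
      rw [hm, List.range_succ_eq_map, List.map_cons, List.map_map]
      have hdrop60 : (rawOf base mutSet (aa :: rest) off).drop 60
          = rawOf base mutSet (rest.drop 59) (off + 60) := by
        rw [rawOf_drop]
        norm_num
      refine congrArg₂ List.cons ?_ ?_
      · simp only [Nat.mul_zero, Nat.zero_add, List.drop_zero, rawOf_take]
      · have hlen : (rest.drop 59).length ≤ n := by
          simp only [List.length_cons] at h
          simp only [List.length_drop]
          omega
        refine Eq.trans (List.map_congr_left fun j hj => ?_) (ih _ hlen (off + 60))
        simp only [Function.comp_apply, Nat.succ_eq_add_one]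
        have harg : 60 * (j + 1) + off + 1 = 60 * j + (off + 60) + 1 := by ring
        have hdr : (rawOf base mutSet (aa :: rest) off).drop (60 * (j + 1))
            = (rawOf base mutSet (rest.drop 59) (off + 60)).drop (60 * j) := by
          rw [show 60 * (j + 1) = 60 + 60 * j by ring, ← List.drop_drop, hdrop60]
        rw [harg, hdr]

-- within a row (k not on a boundary): B's flat pass emits spans until the next boundary
theorem lemR (base : String) (mutSet : PySem.Set Int) :
    ∀ (cs : List Char) (k : Nat), k % 60 ≠ 0 →
      seqB_go base mutSet cs k =
        rawOf base mutSet (cs.take (60 - k % 60)) k ++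
          seqB_go base mutSet (cs.drop (60 - k % 60)) (k + (60 - k % 60)) := by
  intro cs
  induction cs with
  | nil => intro k hk; simp [seqB_go, rawOf]
  | cons aa rest ih =>
    intro k hk
    have hr : 1 ≤ 60 - k % 60 := by omega
    by_cases h59 : k % 60 = 59
    · have : 60 - k % 60 = 1 := by omega
      rw [this]
      simp [seqB_go, hk, rawOf, List.zipIdx_cons]
    · have hk1 : (k + 1) % 60 = k % 60 + 1 := by omega
      have hk1ne : (k + 1) % 60 ≠ 0 := by omega
      have htk : (aa :: rest).take (60 - k % 60) = aa :: rest.take (60 - (k + 1) % 60) := by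
        have : 60 - k % 60 = (60 - (k + 1) % 60) + 1 := by omega
        rw [this]; rfl
      have hdk : (aa :: rest).drop (60 - k % 60) = rest.drop (60 - (k + 1) % 60) := by
        have : 60 - k % 60 = (60 - (k + 1) % 60) + 1 := by omega
        rw [this]; rfl
      have hadd : k + (60 - k % 60) = (k + 1) + (60 - (k + 1) % 60) := by omega
      rw [htk, hdk, hadd]
      simp only [seqB_go, hk, rawOf, List.zipIdx_cons, List.map_cons]
      simp only [ih (k + 1) hk1ne, rawOf]
      simp

-- the flat pass, flattened, is the '<br>'-join of the chunk rows
theorem lemB (base : String) (mutSet : PySem.Set Int) :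
    ∀ n (cs : List Char), cs.length ≤ n → ∀ (k : Nat), k % 60 = 0 →
      PySem.Str.join "" (seqB_go base mutSet cs k) =
        (if cs = [] then "" else if k = 0 then "" else "<br>") ++
          PySem.Str.join "<br>" (rowsC base mutSet cs k) := by
  intro n
  induction n with
  | zero =>
    intro cs h k hk
    have : cs = [] := List.eq_nil_of_length_eq_zero (Nat.le_zero.mp h)
    subst this
    simp only [rowsC]
    simp [seqB_go, sj_nil]
  | succ n ih =>
    intro cs h k hk
    cases cs with
    | nil => simp only [rowsC]; simp [seqB_go, sj_nil]
    | cons aa rest =>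
      have hk1 : (k + 1) % 60 = 1 := by omega
      have hgo : seqB_go base mutSet (aa :: rest) k =
          (if k ≠ 0 then ["<br>"] else []) ++ [seqB_label (k + 1)] ++
            (seqB_span base mutSet (k : Int) aa ::
              (rawOf base mutSet (rest.take 59) (k + 1) ++
                seqB_go base mutSet (rest.drop 59) (k + 60))) := by
        have h1 : seqB_go base mutSet (aa :: rest) k =
            (if k ≠ 0 then ["<br>"] else []) ++ [seqB_label (k + 1)] ++
              (seqB_span base mutSet (k : Int) aa :: seqB_go base mutSet rest (k + 1)) := by
          simp [seqB_go, hk]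
        rw [h1, lemR base mutSet rest (k + 1) (by omega)]
        simp [hk1]
      have hrowhead : rawOf base mutSet ((aa :: rest).take 60) k =
          seqB_span base mutSet (k : Int) aa :: rawOf base mutSet (rest.take 59) (k + 1) := by
        simp [rawOf, List.zipIdx_cons]
      have hlen : (rest.drop 59).length ≤ n := by
        simp only [List.length_cons] at h; simp only [List.length_drop]; omega
      have hIH := ih (rest.drop 59) hlen (k + 60) (by omega)
      rw [hgo, sj_empty_append, sj_empty_cons, sj_empty_append, sj_empty_append, hIH]
      have hhead : PySem.Str.join "" (rawOf base mutSet ((aa :: rest).take 60) k)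
          = seqB_span base mutSet (k : Int) aa ++
              PySem.Str.join "" (rawOf base mutSet (rest.take 59) (k + 1)) := by
        rw [hrowhead, sj_empty_cons]
      by_cases hrest : rest.drop 59 = []
      · have htail0 : rowsC base mutSet (rest.drop 59) (k + 60) = [] := by
          rw [hrest]; simp only [rowsC]
        simp only [rowsC, hrest]
        rw [sj_single]
        rw [hhead]
        by_cases hk0 : k = 0 <;>
          simp [hk0, sj_nil, sj_single, String.append_assoc]
      · have hne : rowsC base mutSet (rest.drop 59) (k + 60) ≠ [] := by
          obtain ⟨b, t, hbt⟩ := List.exists_cons_of_ne_nil hrest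
          rw [hbt]; simp only [rowsC]; simp
        simp only [rowsC]
        rw [sj_cons _ _ _ hne, hhead]
        by_cases hk0 : k = 0 <;>
          simp [hk0, hrest, sj_nil, sj_single, String.append_assoc]

-- A's rows expression equals rowsC
theorem lemArows (base : String) (mutated : String) (mutation_positions : List Int) :
    (PySem.List.pyRange 0 (((PySem.List.enumerate mutated.toList).map
        (fun p => seqA_span base (PySem.Set.ofList mutation_positions) p.1 p.2)).length : Int) 60).map
      (fun start => pvPosLabel (start + 1) ++
        PySem.Str.join "" (PySem.List.slice ((PySem.List.enumerate mutated.toList).map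
          (fun p => seqA_span base (PySem.Set.ofList mutation_positions) p.1 p.2))
          (some start) (some (start + 60))))
    = rowsC base (PySem.Set.ofList mutation_positions) mutated.toList 0 := by
  set mutSet := PySem.Set.ofList mutation_positions with hms
  set cs := mutated.toList with hcs
  have hraw : (PySem.List.enumerate cs).map (fun p => seqA_span base mutSet p.1 p.2)
      = rawOf base mutSet cs 0 := by
    have h0 : PySem.List.enumerate cs = PySem.List.enumerate cs ((0 : Nat) : Int) := by norm_num
    rw [h0, map_enumerate_zipIdx]
    simp [rawOf, span_eq]
  rw [hraw, rawOf_length]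
  rw [PySem.List.pyRange_of_pos 0 (cs.length : Int) (by norm_num)]
  rw [List.map_map]
  have hcount : (if (0 : Int) < (cs.length : Int) then
      (((cs.length : Int) - 0 + 60 - 1) / 60).toNat else 0) = (cs.length + 59) / 60 := by
    split <;> omega
  rw [hcount]
  refine Eq.trans (List.map_congr_left fun j hj => ?_)
    (lemA base mutSet cs.length cs (le_refl _) 0)
  simp only [Function.comp_apply]
  have hlab : pvPosLabel (0 + 60 * (j : Int) + 1) = seqB_label (60 * j + 0 + 1) := by
    rw [show (0 + 60 * (j : Int) + 1) = (((60 * j : Nat) : Int) + 1) by push_cast; ring]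
    rw [← label_eq (60 * j), Nat.add_zero]
  have hsl : PySem.List.slice (rawOf base mutSet cs 0) (some (0 + 60 * (j : Int)))
      (some (0 + 60 * (j : Int) + 60))
      = ((rawOf base mutSet cs 0).drop (60 * j)).take 60 := by
    rw [PySem.List.slice_toNat _ (by positivity) (by positivity)]
    rw [show (0 + 60 * (j : Int)).toNat = 60 * j by omega]
    rw [show (0 + 60 * (j : Int) + 60).toNat - 60 * j = 60 by omega]
  rw [hlab, hsl]

-- ===== VERDICT (by name: the statement is the Claim_ definition above) =====
theorem sequence_diff_html_py_spec : Claim_equal_sequence_diff_html_py := by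
  intro base mutated mutation_positions _
  unfold Spec_sequence_diff_html_py sequence_diff_html_py sequence_diff_html_py_alt
  simp only []
  rw [lemArows base mutated mutation_positions]
  have h := lemB base (PySem.Set.ofList mutation_positions) mutated.toList.length
    mutated.toList (le_refl _) 0 (by norm_num)
  rw [h]
  cases hcs : mutated.toList <;> simp
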